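-- pv_equiv track=rewrite | github.com/HenrykHaniewicz/base_converter | base_converter.py | partition_quotient
-- ===== SOURCE A (Python) =====
-- def partition_quotient(dividend, divisor, minusone=False):
--     """
--     Perform division ensuring non-negative remainders.
--     Returns quotient and remainder where 0 <= remainder < |divisor|.
--     """
--     if minusone and divisor > 0:
--         raise ValueError(f"minusone flag should only be used with negative bases, got base {divisor}")
--     elif minusone and dividend != -1:
--         raise ValueError(f"minusone flag should only be used with a dividend of -1, got dividend {dividend}")
--
--     if not minusone:
--         quotient = dividend // divisor
--     else:
--         quotient = (-1 // divisor) + 1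
--     remainder = dividend - (quotient * divisor)
--     while remainder < 0:
--         quotient += 1
--         remainder += abs(divisor)
--
--     return quotient, remainder
-- ===== SOURCE B (Python) =====
-- def partition_quotient(dividend, divisor, minusone=False):
--     """
--     Perform division ensuring non-negative remainders.
--     Returns quotient and remainder where 0 <= remainder < |divisor|
--     (with minusone, a strictly positive remainder in 1..|divisor|).
--     """
--     if minusone and divisor > 0:
--         raise ValueError(f"minusone flag should only be used with negative bases, got base {divisor}")
--     elif minusone and dividend != -1:
--         raise ValueError(f"minusone flag should only be used with a dividend of -1, got dividend {dividend}")
--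
--     remainder = dividend % abs(divisor)
--     quotient = (dividend - remainder) // divisor
--     if minusone and remainder == 0:
--         # minusone requests a strictly positive remainder: shift to the next representation
--         quotient += 1
--         remainder += abs(divisor)
--     return quotient, remainder
-- ===== Notes on version B (the rewrite author's own statement) =====
-- stated objective: simpler
-- what changed: Replaces the floor-division-then-correction while-loop (and the special minusone quotient formula) with a closed form: remainder = dividend % abs(divisor), quotient = (dividend - remainder) // divisor, with a single conditional shift when minusone requires a strictly positive remainder.
import Mathlib
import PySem

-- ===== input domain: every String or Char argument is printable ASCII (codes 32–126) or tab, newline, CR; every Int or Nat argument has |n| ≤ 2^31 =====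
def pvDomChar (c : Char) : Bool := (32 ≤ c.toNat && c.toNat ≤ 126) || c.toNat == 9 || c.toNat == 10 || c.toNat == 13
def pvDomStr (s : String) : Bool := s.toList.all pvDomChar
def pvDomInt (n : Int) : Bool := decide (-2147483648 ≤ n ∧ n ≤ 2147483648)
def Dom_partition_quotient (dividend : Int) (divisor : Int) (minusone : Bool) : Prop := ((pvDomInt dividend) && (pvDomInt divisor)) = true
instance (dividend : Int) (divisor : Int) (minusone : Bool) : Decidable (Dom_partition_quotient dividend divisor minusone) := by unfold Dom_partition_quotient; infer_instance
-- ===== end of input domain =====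

-- B replaces A's floor-division-then-correction while-loop (and the special minusone quotient
-- formula) with a closed form r = dividend % abs(divisor), q = (dividend - r) // divisor, plus one
-- conditional shift when minusone requires a strictly positive remainder (objective: simpler).

-- ===== PORT A =====
-- the 'while remainder < 0' correction loop; the 'divisor ≠ 0' conjunct only makes the
-- recursion total (Python raises ZeroDivisionError earlier for divisor = 0, excluded by Pre_)
def pqLoop (divisor quotient remainder : Int) : Int × Int :=
  if h : remainder < 0 ∧ divisor ≠ 0 then
    pqLoop divisor (quotient + 1) (remainder + (divisor.natAbs : Int))
  else (quotient, remainder)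
termination_by (-remainder).toNat
decreasing_by omega

def partition_quotient (dividend : Int) (divisor : Int) (minusone : Bool) : Int × Int :=
  let quotient := if !minusone then PySem.Int.floordiv dividend divisor
                  else PySem.Int.floordiv (-1) divisor + 1
  let remainder := dividend - quotient * divisor
  pqLoop divisor quotient remainder

-- ===== PORT B =====
def partition_quotient_alt (dividend : Int) (divisor : Int) (minusone : Bool) : Int × Int :=
  let remainder := PySem.Int.mod dividend (divisor.natAbs : Int)
  let quotient := PySem.Int.floordiv (dividend - remainder) divisor
  if minusone && (remainder == 0) then
    (quotient + 1, remainder + (divisor.natAbs : Int))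
  else (quotient, remainder)

-- ===== PRECONDITION & SPEC =====
-- Pre_ excludes exactly the inputs where Python A raises: divisor = 0 (ZeroDivisionError) and
-- misuse of the minusone flag (ValueError for divisor > 0 or dividend ≠ -1)
def Pre_partition_quotient (dividend : Int) (divisor : Int) (minusone : Bool) : Prop :=
  divisor ≠ 0 ∧ (minusone = true → divisor < 0 ∧ dividend = -1)
instance (dividend : Int) (divisor : Int) (minusone : Bool) : Decidable (Pre_partition_quotient dividend divisor minusone) := by unfold Pre_partition_quotient; infer_instance

def pvWitness_partition_quotient : Int × Int × Bool := (7, 3, false)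

def Spec_partition_quotient (dividend : Int) (divisor : Int) (minusone : Bool) (out : Int × Int) : Prop := out = partition_quotient_alt dividend divisor minusone
instance (dividend : Int) (divisor : Int) (minusone : Bool) (out : Int × Int) : Decidable (Spec_partition_quotient dividend divisor minusone out) := by unfold Spec_partition_quotient; infer_instance

-- ===== CLAIM (what is proved, stated in full; the proofs are below) =====
def Claim_equal_partition_quotient : Prop := ∀ (dividend : Int) (divisor : Int) (minusone : Bool), Dom_partition_quotient dividend divisor minusone → Pre_partition_quotient dividend divisor minusone → Spec_partition_quotient dividend divisor minusone (partition_quotient dividend divisor minusone)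

-- ===== LEMMAS AND PROOFS =====

lemma mod_unique (a m k r : Int) (hm : 0 < m) (h : a = k * m + r) (h0 : 0 ≤ r) (h1 : r < m) :
    PySem.Int.mod a m = r := by
  have hf : PySem.Int.floordiv a m = k := by
    rw [PySem.Int.floordiv_eq_iff_of_pos hm]
    constructor <;> nlinarith
  have hs := PySem.Int.floordiv_mul_add_mod a m
  rw [hf] at hs
  linarith

lemma floordiv_mul_cancel (q d : Int) (hd : d ≠ 0) : PySem.Int.floordiv (q * d) d = q := by
  have h1 := PySem.Int.floordiv_mul_add_mod (q * d) d
  have h2 : PySem.Int.mod (q * d) d = 0 := (PySem.Int.mod_eq_zero_iff_dvd _ _).2 ⟨q, by ring⟩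
  rw [h2, add_zero] at h1
  exact mul_right_cancel₀ hd h1

-- B returns (q, r) for any decomposition a = q*d + r with 0 ≤ r < |d|, provided
-- the minusone shift does not fire (mo = false or r ≠ 0)
lemma alt_char (a d q r : Int) (mo : Bool) (hd : d ≠ 0) (h : a = q * d + r)
    (h0 : 0 ≤ r) (h1 : r < (d.natAbs : Int)) (hif : mo = true → r ≠ 0) :
    partition_quotient_alt a d mo = (q, r) := by
  have hm : 0 < (d.natAbs : Int) := by omega
  have hr : PySem.Int.mod a (d.natAbs : Int) = r := by
    rcases lt_or_gt_of_ne hd with hneg | hpos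
    · have hna : (d.natAbs : Int) = -d := by omega
      exact mod_unique a _ (-q) r hm (by rw [hna]; linarith [h]) h0 h1
    · have hna : (d.natAbs : Int) = d := by omega
      exact mod_unique a _ q r hm (by rw [hna]; exact h) h0 h1
  have hqd : a - r = q * d := by linarith
  show (if mo && (PySem.Int.mod a (d.natAbs : Int) == 0) then _ else _) = (q, r)
  rw [hr]
  cases mo with
  | false =>
    rw [show (false && (r == 0)) = false from rfl, if_neg (by simp)]
    rw [hqd, floordiv_mul_cancel q d hd]
  | true =>
    have hc : (true && (r == 0)) = false := by simpa using hif rfl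
    rw [hc, if_neg (by simp), hqd, floordiv_mul_cancel q d hd]

lemma pqLoop_exit (d q r : Int) (h : 0 ≤ r) : pqLoop d q r = (q, r) := by
  rw [pqLoop, dif_neg]
  omega

lemma pqLoop_step (d q r : Int) (h : r < 0) (hd : d ≠ 0) :
    pqLoop d q r = pqLoop d (q + 1) (r + (d.natAbs : Int)) := by
  rw [pqLoop, dif_pos ⟨h, hd⟩]

lemma A_at_minusone_neg1 : partition_quotient (-1) (-1) true = (2, 1) := by
  have h1 : PySem.Int.floordiv (-1 : Int) (-1) = 1 := by decide
  show pqLoop (-1) (PySem.Int.floordiv (-1) (-1) + 1)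
      (-1 - (PySem.Int.floordiv (-1) (-1) + 1) * (-1)) = (2, 1)
  rw [h1, pqLoop_exit _ _ _ (by norm_num)]
  norm_num

-- ===== VERDICT (by name: the statement is the Claim_ definition above) =====
theorem partition_quotient_spec : Claim_equal_partition_quotient := by
  intro a d mo _ hpre
  obtain ⟨hd, hmo⟩ := hpre
  cases mo with
  | false =>
    have hsum := PySem.Int.floordiv_mul_add_mod a d
    set q0 := PySem.Int.floordiv a d with hq0
    set r0 := PySem.Int.mod a d with hr0
    have hrem : a - q0 * d = r0 := by linarith
    show pqLoop d q0 (a - q0 * d) = _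
    rw [hrem]
    rcases lt_or_gt_of_ne hd with hneg | hpos
    · have hb := PySem.Int.mod_neg_bounds a hneg
      by_cases hz : r0 = 0
      · rw [hz, pqLoop_exit d q0 0 le_rfl]
        exact (alt_char a d q0 0 false hd (by rw [hz] at hsum; linarith) le_rfl (by omega)
          (by simp)).symm
      · have hna : (d.natAbs : Int) = -d := by omega
        rw [pqLoop_step d q0 r0 (by omega) hd,
            pqLoop_exit d (q0 + 1) (r0 + (d.natAbs : Int)) (by omega)]
        exact (alt_char a d (q0 + 1) (r0 + (d.natAbs : Int)) false hd
          (by rw [hna]; ring_nf; linarith) (by omega) (by omega) (by simp)).symm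
    · have h0 := PySem.Int.mod_nonneg a hpos
      have h1 := PySem.Int.mod_lt a hpos
      rw [pqLoop_exit d q0 r0 (by omega)]
      exact (alt_char a d q0 r0 false hd (by linarith) (by omega) (by omega) (by simp)).symm
  | true =>
    obtain ⟨hdneg, ha⟩ := hmo rfl
    subst ha
    by_cases hd1 : d = -1
    · subst hd1
      rw [A_at_minusone_neg1]
      decide
    · have hd2 : d ≤ -2 := by omega
      have hf0 : PySem.Int.floordiv (-1) d = 0 := by
        have := PySem.Int.floordiv_neg_neg 1 (-d)
        simp only [neg_neg] at this
        rw [this, PySem.Int.floordiv_eq_iff_of_pos (by omega : (0:Int) < -d)]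
        constructor <;> omega
      show pqLoop d (PySem.Int.floordiv (-1) d + 1) (-1 - (PySem.Int.floordiv (-1) d + 1) * d) = _
      rw [hf0]
      have hrem : -1 - (0 + 1) * d = -1 - d := by ring
      rw [hrem, pqLoop_exit d (0 + 1) (-1 - d) (by omega)]
      exact (alt_char (-1) d (0 + 1) (-1 - d) true hd (by ring) (by omega) (by omega)
        (by intro _; omega)).symm
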